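-- pv_equiv track=rewrite | github.com/HenryZhuANU/PVAD | Prove/src/newProver/experiment_dt.py | fixed_length_binary_decomposition
-- ===== SOURCE A (Python) =====
-- def fixed_length_binary_decomposition(n, k):
--     if abs(n) >= 2 ** k:
--         raise ValueError("Absolute value of n is too large to be represented with k bits.")
--
--     result = [0] * k
--     abs_n = abs(n)
--     for i in range(k - 1, -1, -1):
--         coefficient = abs_n // (2 ** i)
--         abs_n -= coefficient * (2 ** i)
--         result[i] = coefficient if n >= 0 else -coefficient
--     return result
-- ===== SOURCE B (Python) =====
-- def fixed_length_binary_decomposition(n, k):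
--     if abs(n) >= 2 ** k:
--         raise ValueError("Absolute value of n is too large to be represented with k bits.")
--     sign = 1 if n >= 0 else -1
--     a = abs(n)
--     return [sign * (a // 2 ** i % 2) for i in range(k)]
-- ===== Notes on version B (the rewrite author's own statement) =====
-- stated objective: simpler
-- what changed: Replaces the high-to-low mutating loop that maintains a running remainder and writes into a preallocated list with a single low-to-high comprehension computing each signed bit directly as sign*(abs(n)//2**i % 2).
import Mathlib
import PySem

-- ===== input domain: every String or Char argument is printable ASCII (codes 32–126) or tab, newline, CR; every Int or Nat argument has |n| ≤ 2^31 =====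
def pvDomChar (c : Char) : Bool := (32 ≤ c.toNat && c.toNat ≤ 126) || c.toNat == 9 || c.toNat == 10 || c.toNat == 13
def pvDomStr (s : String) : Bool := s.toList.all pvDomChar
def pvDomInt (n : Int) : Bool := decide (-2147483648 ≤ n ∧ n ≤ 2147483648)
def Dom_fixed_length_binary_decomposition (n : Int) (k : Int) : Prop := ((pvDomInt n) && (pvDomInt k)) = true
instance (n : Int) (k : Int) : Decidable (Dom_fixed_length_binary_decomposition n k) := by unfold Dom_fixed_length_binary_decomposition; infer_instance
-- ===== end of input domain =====

-- B replaces A's high-to-low mutating remainder loop by a direct per-bit comprehension (simpler); same return values wherever A returns.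

-- ===== PORT A =====
-- the for-loop over range(k-1, -1, -1) carrying the mutable pair (abs_n, result)
def fixed_length_binary_decomposition (n : Int) (k : Int) : List Int :=
  let st := (PySem.List.pyRange (k - 1) (-1) (-1)).foldl
    (fun (s : Int × List Int) (i : Int) =>
      let coefficient := PySem.Int.floordiv s.1 (2 ^ i.toNat)
      (s.1 - coefficient * 2 ^ i.toNat,
       s.2.set i.toNat (if n ≥ 0 then coefficient else -coefficient)))
    (|n|, List.replicate k.toNat 0)
  st.2

-- ===== PORT B =====
-- [sign * (abs(n) // 2**i % 2) for i in range(k)]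
def fixed_length_binary_decomposition_alt (n : Int) (k : Int) : List Int :=
  let sign : Int := if n ≥ 0 then 1 else -1
  (PySem.List.pyRange 0 k 1).map
    (fun i => sign * PySem.Int.mod (PySem.Int.floordiv |n| (2 ^ i.toNat)) 2)

-- ===== PRECONDITION & SPEC =====
-- Pre_ = exactly the inputs where Python A does not raise ValueError, i.e. abs(n) < 2**k
-- (for k < 0, 2**k is a positive fraction in Python, so exactly n = 0 passes the guard).
def Pre_fixed_length_binary_decomposition (n : Int) (k : Int) : Prop :=
  if 0 ≤ k then |n| < 2 ^ k.toNat else n = 0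
instance (n : Int) (k : Int) : Decidable (Pre_fixed_length_binary_decomposition n k) := by
  unfold Pre_fixed_length_binary_decomposition; infer_instance
def pvWitness_fixed_length_binary_decomposition : Int × Int := (5, 3)

def Spec_fixed_length_binary_decomposition (n : Int) (k : Int) (out : List Int) : Prop := out = fixed_length_binary_decomposition_alt n k
instance (n : Int) (k : Int) (out : List Int) : Decidable (Spec_fixed_length_binary_decomposition n k out) := by unfold Spec_fixed_length_binary_decomposition; infer_instance

-- ===== CLAIM (what is proved, stated in full; the proofs are below) =====
def Claim_equal_fixed_length_binary_decomposition : Prop := ∀ (n : Int) (k : Int), Dom_fixed_length_binary_decomposition n k → Pre_fixed_length_binary_decomposition n k → Spec_fixed_length_binary_decomposition n k (fixed_length_binary_decomposition n k)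

-- ===== LEMMAS AND PROOFS =====

theorem pv_nat_bit (m j : Nat) : m % 2^(j+1) / 2^j = m / 2^j % 2 := by
  have hp : 0 < 2^j := by positivity
  have h := Nat.div_add_mod m (2^(j+1))
  set q := m / 2^(j+1) with hq
  set r := m % 2^(j+1) with hrdef
  have hr : r < 2^(j+1) := Nat.mod_lt _ (by positivity)
  have h1 : m / 2^j = 2*q + r / 2^j := by
    rw [← h, pow_succ, show 2^j*2*q + r = 2^j*(2*q) + r by ring, Nat.mul_add_div hp]
  have h2 : r / 2^j < 2 := by
    rw [Nat.div_lt_iff_lt_mul hp]; rw [pow_succ] at hr; omega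
  rw [h1, Nat.mul_add_mod, Nat.mod_eq_of_lt h2]

theorem pv_drop_set {α : Type} (l : List α) (j : Nat) (x : α) (h : j < l.length) :
    (l.set j x).drop j = x :: l.drop (j+1) := by
  induction l generalizing j with
  | nil => simp at h
  | cons a l ih =>
      cases j with
      | zero => simp
      | succ j => simpa using ih j (by simpa using h)

-- the bit extracted by A's remainder loop is B's direct bit
theorem pv_bit_step (N : Int) (j : Nat) (hN : 0 ≤ N) :
    (N % 2 ^ (j + 1)) / 2 ^ j = N / 2 ^ j % 2 := by
  obtain ⟨m, rfl⟩ := Int.eq_ofNat_of_zero_le hN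
  have e1 : ((m : Int) % 2 ^ (j + 1)) = ((m % 2 ^ (j + 1) : Nat) : Int) := by push_cast; ring_nf
  have e2 : ((m : Int) / 2 ^ j) = ((m / 2 ^ j : Nat) : Int) := by push_cast; ring_nf
  rw [e1, e2]
  have e3 : ((m / 2 ^ j : Nat) : Int) % 2 = ((m / 2 ^ j % 2 : Nat) : Int) := by push_cast; ring_nf
  have e4 : ((m % 2 ^ (j + 1) : Nat) : Int) / 2 ^ j = ((m % 2 ^ (j + 1) / 2 ^ j : Nat) : Int) := by
    push_cast; ring_nf
  rw [e3, e4]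
  exact_mod_cast pv_nat_bit m j

-- main invariant of A's loop, descending over bits j-1 .. 0
theorem pv_loop_eq (n : Int) (j : Nat) (l : List Int) (hl : j ≤ l.length) :
    ((PySem.List.pyRange ((j : Int) - 1) (-1) (-1)).foldl
      (fun (s : Int × List Int) (i : Int) =>
        let coefficient := PySem.Int.floordiv s.1 (2 ^ i.toNat)
        (s.1 - coefficient * 2 ^ i.toNat,
         s.2.set i.toNat (if n ≥ 0 then coefficient else -coefficient)))
      (|n| % 2 ^ j, l)).2
    = (List.range j).map
        (fun i => (if n ≥ 0 then (1 : Int) else -1) * (|n| / 2 ^ i % 2)) ++ l.drop j := by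
  induction j generalizing l with
  | zero =>
      rw [PySem.List.pyRange_neg_one_eq_nil (by norm_num)]
      simp
  | succ j ih =>
      have hstep : PySem.List.pyRange ((j + 1 : ℕ) - 1) (-1) (-1)
          = (j : Int) :: PySem.List.pyRange ((j : Int) - 1) (-1) (-1) := by
        rw [show ((j + 1 : ℕ) : Int) - 1 = (j : Int) by push_cast; ring]
        exact PySem.List.pyRange_neg_one_cons (by omega)
      rw [hstep, List.foldl_cons]
      have hN : (0 : Int) ≤ |n| := abs_nonneg n
      have hpow : (0 : Int) < 2 ^ j := by positivity
      set a : Int := |n| % 2 ^ (j + 1) with ha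
      have hjt : ((j : Int).toNat) = j := by simp
      have hfd : PySem.Int.floordiv a (2 ^ (j : Int).toNat) = |n| / 2 ^ j % 2 := by
        rw [hjt, PySem.Int.floordiv_eq_ediv_of_pos hpow, ha, pv_bit_step _ _ hN]
      have hrem : a - (|n| / 2 ^ j % 2) * 2 ^ (j : Int).toNat = |n| % 2 ^ j := by
        rw [hjt]
        have h1 : a % 2 ^ j = |n| % 2 ^ j :=
          Int.emod_emod_of_dvd _ (by rw [pow_succ]; exact Dvd.intro 2 rfl)
        have h2 : a / 2 ^ j = |n| / 2 ^ j % 2 := pv_bit_step _ _ hN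
        have h4 : a % 2 ^ j + 2 ^ j * (a / 2 ^ j) = a := Int.emod_add_mul_ediv a (2 ^ j)
        rw [h1, h2] at h4
        linear_combination -h4
      simp only [hfd, hrem]
      rw [ih _ (by simp; omega)]
      rw [hjt, pv_drop_set _ _ _ (by omega)]
      rw [List.range_succ, List.map_append]
      simp only [List.map_cons, List.map_nil, List.append_assoc, List.cons_append,
        List.nil_append]
      congr 2
      split_ifs <;> ring

-- ===== VERDICT (by name: the statement is the Claim_ definition above) =====
theorem fixed_length_binary_decomposition_spec : Claim_equal_fixed_length_binary_decomposition := by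
  intro n k _ hpre
  unfold Spec_fixed_length_binary_decomposition
  unfold Pre_fixed_length_binary_decomposition at hpre
  unfold fixed_length_binary_decomposition fixed_length_binary_decomposition_alt
  by_cases hk : 0 ≤ k
  · rw [if_pos hk] at hpre
    set j := k.toNat with hj
    have hkj : k = (j : Int) := (Int.toNat_of_nonneg hk).symm
    have hmod : |n| % 2 ^ j = |n| := Int.emod_eq_of_lt (abs_nonneg n) hpre
    have hA := pv_loop_eq n j (List.replicate j 0) (by simp)
    rw [hmod] at hA
    rw [hkj]
    simp only []
    rw [hA]
    rw [PySem.List.pyRange_one]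
    simp only [List.map_map, List.drop_replicate, Nat.sub_self, List.replicate_zero,
      List.append_nil, sub_zero, Int.toNat_natCast]
    apply List.map_congr_left
    intro t ht
    simp only [Function.comp_apply, zero_add, Int.toNat_natCast]
    rw [PySem.Int.floordiv_eq_ediv_of_pos (by positivity),
        PySem.Int.mod_eq_emod_of_pos (by norm_num)]
  · rw [if_neg hk] at hpre
    subst hpre
    have h1 : PySem.List.pyRange (k - 1) (-1) (-1) = [] :=
      PySem.List.pyRange_neg_one_eq_nil (by omega)
    have hk0 : k ≤ (0:Int) := by omega
    have h2 : PySem.List.pyRange 0 k 1 = [] :=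
      PySem.List.pyRange_one_eq_nil hk0
    simp [h1, h2]
    omega
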